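-- pv_equiv track=rewrite | github.com/Plouc314/game | 1.py | control_black_pawn_capture
-- ===== SOURCE A (Python) =====
-- def control_black_pawn_capture(white_pawn_placement,black_pawn_placement):
--     returned = []
--     for i in range(len(black_pawn_placement)):
--         co_of_black_pawn = [black_pawn_placement[i][0],black_pawn_placement[i][1]]
--         test = 0
--         for e in range(len(white_pawn_placement)):
--             co_of_white_pawn = [white_pawn_placement[e][0],white_pawn_placement[e][1]]
--             #test vertical dessus
--             if co_of_black_pawn[0] == co_of_white_pawn[0] and co_of_black_pawn[1] == co_of_white_pawn[1] + 1:
--                 test += 1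
--             #test vertical dessous
--             if co_of_black_pawn[0] == co_of_white_pawn[0] and co_of_black_pawn[1] == co_of_white_pawn[1] - 1:
--                 test += 1
--             #test horizontal droite
--             if co_of_black_pawn[1] == co_of_white_pawn[1] and co_of_black_pawn[0] == co_of_white_pawn[0] + 1:
--                 test += 1
--             #test horizontal gauche
--             if co_of_black_pawn[1] == co_of_white_pawn[1] and co_of_black_pawn[0] == co_of_white_pawn[0] - 1:
--                 test += 1
--         if test >= 2:
--             returned.append(i)
--     return returned
-- ===== SOURCE B (Python) =====
-- def control_black_pawn_capture(white_pawn_placement, black_pawn_placement):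
--     # Count white pawns per coordinate once, then check the 4 neighbours of each black pawn.
--     counts = {}
--     for p in white_pawn_placement:
--         key = (p[0], p[1])
--         counts[key] = counts.get(key, 0) + 1
--     result = []
--     for i, p in enumerate(black_pawn_placement):
--         x, y = p[0], p[1]
--         if counts.get((x, y - 1), 0) + counts.get((x, y + 1), 0) \
--            + counts.get((x - 1, y), 0) + counts.get((x + 1, y), 0) >= 2:
--             result.append(i)
--     return result
-- ===== Notes on version B (the rewrite author's own statement) =====
-- stated objective: faster
-- what changed: Replaced the per-black-pawn scan over all white pawns by a dict counting white pawns per coordinate built once, so each black pawn only looks up its 4 neighbours.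
-- outside the precondition, e.g. on control_black_pawn_capture([[1]], []): A returns [], B raises IndexError
import Mathlib
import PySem

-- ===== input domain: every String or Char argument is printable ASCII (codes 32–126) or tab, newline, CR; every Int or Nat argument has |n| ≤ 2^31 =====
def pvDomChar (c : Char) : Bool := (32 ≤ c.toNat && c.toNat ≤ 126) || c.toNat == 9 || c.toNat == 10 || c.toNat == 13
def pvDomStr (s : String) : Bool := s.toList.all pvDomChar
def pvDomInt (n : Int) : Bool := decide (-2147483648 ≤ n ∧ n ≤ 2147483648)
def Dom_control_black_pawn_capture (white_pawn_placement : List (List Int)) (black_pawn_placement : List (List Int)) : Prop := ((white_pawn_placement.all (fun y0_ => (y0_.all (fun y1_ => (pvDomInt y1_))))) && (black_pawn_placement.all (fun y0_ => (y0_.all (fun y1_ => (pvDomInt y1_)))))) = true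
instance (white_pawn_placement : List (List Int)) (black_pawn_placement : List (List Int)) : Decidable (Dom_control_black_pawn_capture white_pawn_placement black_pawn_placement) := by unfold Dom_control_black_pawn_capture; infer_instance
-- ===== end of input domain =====

-- B builds a coordinate→count dict over the white pawns once and checks the 4 neighbours of each
-- black pawn, replacing A's scan over all white pawns per black pawn (measurably faster, asymptotic).


-- ===== PORT A =====
def control_black_pawn_capture (white_pawn_placement : List (List Int)) (black_pawn_placement : List (List Int)) : List Int :=
  (PySem.List.pyRange 0 (PySem.List.len black_pawn_placement) 1).foldl (fun returned i =>
    let bp := PySem.List.pyGetD black_pawn_placement i []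
    -- co_of_black_pawn = [bp[0], bp[1]] (indexing the 2-element literal list is kept as the two components)
    let co_of_black_pawn : List Int := [PySem.List.pyGetD bp 0 0, PySem.List.pyGetD bp 1 0]
    let test : Int :=
      (PySem.List.pyRange 0 (PySem.List.len white_pawn_placement) 1).foldl (fun test e =>
        let wp := PySem.List.pyGetD white_pawn_placement e []
        let co_of_white_pawn : List Int := [PySem.List.pyGetD wp 0 0, PySem.List.pyGetD wp 1 0]
        -- test vertical dessus
        let test := if PySem.List.pyGetD co_of_black_pawn 0 0 = PySem.List.pyGetD co_of_white_pawn 0 0 ∧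
                       PySem.List.pyGetD co_of_black_pawn 1 0 = PySem.List.pyGetD co_of_white_pawn 1 0 + 1 then test + 1 else test
        -- test vertical dessous
        let test := if PySem.List.pyGetD co_of_black_pawn 0 0 = PySem.List.pyGetD co_of_white_pawn 0 0 ∧
                       PySem.List.pyGetD co_of_black_pawn 1 0 = PySem.List.pyGetD co_of_white_pawn 1 0 - 1 then test + 1 else test
        -- test horizontal droite
        let test := if PySem.List.pyGetD co_of_black_pawn 1 0 = PySem.List.pyGetD co_of_white_pawn 1 0 ∧
                       PySem.List.pyGetD co_of_black_pawn 0 0 = PySem.List.pyGetD co_of_white_pawn 0 0 + 1 then test + 1 else test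
        -- test horizontal gauche
        let test := if PySem.List.pyGetD co_of_black_pawn 1 0 = PySem.List.pyGetD co_of_white_pawn 1 0 ∧
                       PySem.List.pyGetD co_of_black_pawn 0 0 = PySem.List.pyGetD co_of_white_pawn 0 0 - 1 then test + 1 else test
        test) 0
    if 2 ≤ test then returned ++ [i] else returned) []

-- ===== PORT B =====
def control_black_pawn_capture_alt (white_pawn_placement : List (List Int)) (black_pawn_placement : List (List Int)) : List Int :=
  let counts : PySem.Dict (Int × Int) Int :=
    white_pawn_placement.foldl (fun d p =>
      d.modify (PySem.List.pyGetD p 0 0, PySem.List.pyGetD p 1 0) 0 (· + 1)) PySem.Dict.empty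
  (PySem.List.enumerate black_pawn_placement 0).foldl (fun result ip =>
    let x := PySem.List.pyGetD ip.2 0 0
    let y := PySem.List.pyGetD ip.2 1 0
    if 2 ≤ counts.getD (x, y - 1) 0 + counts.getD (x, y + 1) 0
          + counts.getD (x - 1, y) 0 + counts.getD (x + 1, y) 0 then result ++ [ip.1] else result) []

-- ===== PRECONDITION & SPEC =====
-- Pre_ excludes the inputs on which a pawn entry has fewer than 2 coordinates: A raises IndexError there,
-- except that with an empty black list A never reads the white entries and returns [] while B's counting
-- pass still raises IndexError on a short white entry.
def Pre_control_black_pawn_capture (white_pawn_placement : List (List Int)) (black_pawn_placement : List (List Int)) : Prop :=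
  (∀ p ∈ white_pawn_placement, 2 ≤ p.length) ∧ (∀ p ∈ black_pawn_placement, 2 ≤ p.length)
instance (white_pawn_placement : List (List Int)) (black_pawn_placement : List (List Int)) : Decidable (Pre_control_black_pawn_capture white_pawn_placement black_pawn_placement) := by unfold Pre_control_black_pawn_capture; infer_instance
def pvWitness_control_black_pawn_capture : List (List Int) × List (List Int) := ([[0, 0], [2, 1]], [[1, 1], [0, 1]])

def Spec_control_black_pawn_capture (white_pawn_placement : List (List Int)) (black_pawn_placement : List (List Int)) (out : List Int) : Prop := out = control_black_pawn_capture_alt white_pawn_placement black_pawn_placement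
instance (white_pawn_placement : List (List Int)) (black_pawn_placement : List (List Int)) (out : List Int) : Decidable (Spec_control_black_pawn_capture white_pawn_placement black_pawn_placement out) := by unfold Spec_control_black_pawn_capture; infer_instance

-- ===== CLAIM (what is proved, stated in full; the proofs are below) =====
def Claim_equal_control_black_pawn_capture : Prop := ∀ (white_pawn_placement : List (List Int)) (black_pawn_placement : List (List Int)), Dom_control_black_pawn_capture white_pawn_placement black_pawn_placement → Pre_control_black_pawn_capture white_pawn_placement black_pawn_placement → Spec_control_black_pawn_capture white_pawn_placement black_pawn_placement (control_black_pawn_capture white_pawn_placement black_pawn_placement)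

-- ===== LEMMAS AND PROOFS =====

-- the coordinate key of a pawn entry, as both programs read it
def pvKey (p : List Int) : Int × Int := (PySem.List.pyGetD p 0 0, PySem.List.pyGetD p 1 0)

-- A's inner loop over the white pawns counts, with multiplicity, the white pawns whose
-- coordinates are one of the four neighbours of (bx, by).
theorem innerCount (wp : List (List Int)) (bx by' acc : Int) :
    wp.foldl (fun test w =>
        let test := if bx = (pvKey w).1 ∧ by' = (pvKey w).2 + 1 then test + 1 else test
        let test := if bx = (pvKey w).1 ∧ by' = (pvKey w).2 - 1 then test + 1 else test
        let test := if by' = (pvKey w).2 ∧ bx = (pvKey w).1 + 1 then test + 1 else test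
        let test := if by' = (pvKey w).2 ∧ bx = (pvKey w).1 - 1 then test + 1 else test
        test) acc
    = acc + ((wp.map pvKey).count (bx, by' - 1) + (wp.map pvKey).count (bx, by' + 1)
           + (wp.map pvKey).count (bx - 1, by') + (wp.map pvKey).count (bx + 1, by') : Int) := by
  induction wp generalizing acc with
  | nil => simp
  | cons w ws ih =>
    rcases hk : pvKey w with ⟨wx, wy⟩
    simp only [List.foldl_cons, List.map_cons, List.count_cons, ih, hk, beq_iff_eq,
      Prod.mk.injEq]
    split_ifs <;> push_cast <;> omega

theorem pyGetD_pair0 (a b d : Int) : PySem.List.pyGetD [a, b] 0 d = a := rfl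
theorem pyGetD_pair1 (a b d : Int) : PySem.List.pyGetD [a, b] 1 d = b := rfl

-- A's inner index loop, in the zeta-expanded shape the main proof meets it in
theorem innerRange (wp : List (List Int)) (bx by' : Int) :
    (PySem.List.pyRange 0 (PySem.List.len wp) 1).foldl (fun test e => (if by' = PySem.List.pyGetD (PySem.List.pyGetD wp e []) 1 0 ∧ bx = PySem.List.pyGetD (PySem.List.pyGetD wp e []) 0 0 - 1 then ((if by' = PySem.List.pyGetD (PySem.List.pyGetD wp e []) 1 0 ∧ bx = PySem.List.pyGetD (PySem.List.pyGetD wp e []) 0 0 + 1 then ((if bx = PySem.List.pyGetD (PySem.List.pyGetD wp e []) 0 0 ∧ by' = PySem.List.pyGetD (PySem.List.pyGetD wp e []) 1 0 - 1 then ((if bx = PySem.List.pyGetD (PySem.List.pyGetD wp e []) 0 0 ∧ by' = PySem.List.pyGetD (PySem.List.pyGetD wp e []) 1 0 + 1 then (test) + 1 else (test))) + 1 else ((if bx = PySem.List.pyGetD (PySem.List.pyGetD wp e []) 0 0 ∧ by' = PySem.List.pyGetD (PySem.List.pyGetD wp e []) 1 0 + 1 then (test) + 1 else (test))))) + 1 else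 ((if bx = PySem.List.pyGetD (PySem.List.pyGetD wp e []) 0 0 ∧ by' = PySem.List.pyGetD (PySem.List.pyGetD wp e []) 1 0 - 1 then ((if bx = PySem.List.pyGetD (PySem.List.pyGetD wp e []) 0 0 ∧ by' = PySem.List.pyGetD (PySem.List.pyGetD wp e []) 1 0 + 1 then (test) + 1 else (test))) + 1 else ((if bx = PySem.List.pyGetD (PySem.List.pyGetD wp e []) 0 0 ∧ by' = PySem.List.pyGetD (PySem.List.pyGetD wp e []) 1 0 + 1 then (test) + 1 else (test))))))) + 1 else ((if by' = PySem.List.pyGetD (PySem.List.pyGetD wp e []) 1 0 ∧ bx = PySem.List.pyGetD (PySem.List.pyGetD wp e []) 0 0 + 1 then ((if bx = PySem.List.pyGetD (PySem.List.pyGetD wp e []) 0 0 ∧ by' = PySem.List.pyGetD (PySem.List.pyGetD wp e []) 1 0 - 1 then ((if bx = PySem.List.pyGetD (PySem.List.pyGetD wp e []) 0 0 ∧ by' = PySem.List.pyGetD (PySem.List.pyGetD wp e []) 1 0 + 1 then (test) + 1 else (test))) + 1 else ((if bx = PySem.List.pyGetD (PySem.List.pyGetD wp e []) 0 0 ∧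 by' = PySem.List.pyGetD (PySem.List.pyGetD wp e []) 1 0 + 1 then (test) + 1 else (test))))) + 1 else ((if bx = PySem.List.pyGetD (PySem.List.pyGetD wp e []) 0 0 ∧ by' = PySem.List.pyGetD (PySem.List.pyGetD wp e []) 1 0 - 1 then ((if bx = PySem.List.pyGetD (PySem.List.pyGetD wp e []) 0 0 ∧ by' = PySem.List.pyGetD (PySem.List.pyGetD wp e []) 1 0 + 1 then (test) + 1 else (test))) + 1 else ((if bx = PySem.List.pyGetD (PySem.List.pyGetD wp e []) 0 0 ∧ by' = PySem.List.pyGetD (PySem.List.pyGetD wp e []) 1 0 + 1 then (test) + 1 else (test))))))))) 0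
    = ((wp.map pvKey).count (bx, by' - 1) : Int) + ((wp.map pvKey).count (bx, by' + 1) : Int)
      + ((wp.map pvKey).count (bx - 1, by') : Int) + ((wp.map pvKey).count (bx + 1, by') : Int) := by
  refine (PySem.List.foldl_pyRange_zero_pyGetD wp ([] : List Int)
      (fun test w => (if by' = PySem.List.pyGetD (w) 1 0 ∧ bx = PySem.List.pyGetD (w) 0 0 - 1 then ((if by' = PySem.List.pyGetD (w) 1 0 ∧ bx = PySem.List.pyGetD (w) 0 0 + 1 then ((if bx = PySem.List.pyGetD (w) 0 0 ∧ by' = PySem.List.pyGetD (w) 1 0 - 1 then ((if bx = PySem.List.pyGetD (w) 0 0 ∧ by' = PySem.List.pyGetD (w) 1 0 + 1 then (test) + 1 else (test))) + 1 else ((if bx = PySem.List.pyGetD (w) 0 0 ∧ by' = PySem.List.pyGetD (w) 1 0 + 1 then (test) + 1 else (test))))) + 1 else ((if bx = PySem.List.pyGetD (w) 0 0 ∧ by' = PySem.List.pyGetD (w) 1 0 - 1 then ((if bx = PySem.List.pyGetD (w) 0 0 ∧ by' = PySem.List.pyGetD (w) 1 0 + 1 then (test) + 1 else (test))) + 1 else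 ((if bx = PySem.List.pyGetD (w) 0 0 ∧ by' = PySem.List.pyGetD (w) 1 0 + 1 then (test) + 1 else (test))))))) + 1 else ((if by' = PySem.List.pyGetD (w) 1 0 ∧ bx = PySem.List.pyGetD (w) 0 0 + 1 then ((if bx = PySem.List.pyGetD (w) 0 0 ∧ by' = PySem.List.pyGetD (w) 1 0 - 1 then ((if bx = PySem.List.pyGetD (w) 0 0 ∧ by' = PySem.List.pyGetD (w) 1 0 + 1 then (test) + 1 else (test))) + 1 else ((if bx = PySem.List.pyGetD (w) 0 0 ∧ by' = PySem.List.pyGetD (w) 1 0 + 1 then (test) + 1 else (test))))) + 1 else ((if bx = PySem.List.pyGetD (w) 0 0 ∧ by' = PySem.List.pyGetD (w) 1 0 - 1 then ((if bx = PySem.List.pyGetD (w) 0 0 ∧ by' = PySem.List.pyGetD (w) 1 0 + 1 then (test) + 1 else (test))) + 1 else ((if bx = PySem.List.pyGetD (w) 0 0 ∧ by' = PySem.List.pyGetD (w) 1 0 + 1 then (test) + 1 else (test))))))))) 0).trans ?_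
  exact (innerCount wp bx by' 0).trans (zero_add _)

-- the white-pawn counting dict, read back: getD is the multiplicity of the key among the white pawns
theorem countsGetD (wp : List (List Int)) (key : Int × Int) :
    (wp.foldl (fun d p =>
        d.modify (PySem.List.pyGetD p 0 0, PySem.List.pyGetD p 1 0) 0 (· + 1))
        (PySem.Dict.empty : PySem.Dict (Int × Int) Int)).getD key 0
    = ((wp.map pvKey).count key : Int) := by
  have h : wp.foldl (fun d p =>
        d.modify (PySem.List.pyGetD p 0 0, PySem.List.pyGetD p 1 0) 0 (· + 1))
        (PySem.Dict.empty : PySem.Dict (Int × Int) Int)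
      = (wp.map pvKey).foldl (fun d k => d.modify k 0 (· + 1)) PySem.Dict.empty := by
    rw [List.foldl_map]
    rfl
  rw [h, PySem.Dict.getD_foldl_modify_add_one, PySem.Dict.getD_empty, zero_add]


-- ===== VERDICT (by name: the statement is the Claim_ definition above) =====
theorem control_black_pawn_capture_spec : Claim_equal_control_black_pawn_capture := by
  intro wp bp _ _
  unfold Spec_control_black_pawn_capture control_black_pawn_capture control_black_pawn_capture_alt
  rw [PySem.List.enumerate_eq_map_pyRange (d := ([] : List Int)), List.foldl_map]
  apply Eq.symm
  apply PySem.List.foldl_congr_mem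
  intro acc i _
  simp only [countsGetD, pyGetD_pair0, pyGetD_pair1]
  exact (congrArg (fun t : Int => if 2 ≤ t then acc ++ [i] else acc)
    (innerRange wp (PySem.List.pyGetD (PySem.List.pyGetD bp i []) 0 0)
      (PySem.List.pyGetD (PySem.List.pyGetD bp i []) 1 0))).symm
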